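-- pv_equiv track=rewrite | github.com/tsukuro19/Algorithm-Exercise | Hackerrank/Problem Solving (Basic) Skills Certification Test/Maximum cost of laptop count.py | Maximum_cost_laptop
-- ===== SOURCE A (Python) =====
-- def Maximum_cost_laptop(size,laptops,legals,daily_count):
--     maximum_cost,count,current_cost=0,0,0
--     for cost,legal in zip(laptops,legals):
--         current_cost+=cost
--         if legal=="illegal":
--             continue
--         count+=1
--         if count==daily_count:
--             maximum_cost=max(current_cost,maximum_cost)
--             current_cost=0
--             count=0
--     return maximum_cost
-- ===== SOURCE B (Python) =====
-- def _split_batch(pairs, d):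
--     """First complete batch (shortest prefix containing d legal entries) and the
--     remainder, or None if no complete batch exists."""
--     if d <= 0:
--         return None
--     seen = 0
--     for i, (_, legal) in enumerate(pairs):
--         if legal != "illegal":
--             seen += 1
--             if seen == d:
--                 return pairs[:i + 1], pairs[i + 1:]
--     return None
--
--
-- def Maximum_cost_laptop(size, laptops, legals, daily_count):
--     best, rest = 0, list(zip(laptops, legals))
--     while True:
--         split = _split_batch(rest, daily_count)
--         if split is None:
--             return best
--         batch, rest = split
--         best = max(best, sum(cost for cost, _ in batch))
-- ===== Notes on version B (the rewrite author's own statement) =====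
-- stated objective: alternative
-- what changed: B repeatedly splits off the first complete batch (the shortest prefix containing daily_count legal entries) and takes the max of whole-batch slice sums, instead of A's single pass interleaving a running cost, a legal counter and a max with in-place resets.
import Mathlib
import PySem

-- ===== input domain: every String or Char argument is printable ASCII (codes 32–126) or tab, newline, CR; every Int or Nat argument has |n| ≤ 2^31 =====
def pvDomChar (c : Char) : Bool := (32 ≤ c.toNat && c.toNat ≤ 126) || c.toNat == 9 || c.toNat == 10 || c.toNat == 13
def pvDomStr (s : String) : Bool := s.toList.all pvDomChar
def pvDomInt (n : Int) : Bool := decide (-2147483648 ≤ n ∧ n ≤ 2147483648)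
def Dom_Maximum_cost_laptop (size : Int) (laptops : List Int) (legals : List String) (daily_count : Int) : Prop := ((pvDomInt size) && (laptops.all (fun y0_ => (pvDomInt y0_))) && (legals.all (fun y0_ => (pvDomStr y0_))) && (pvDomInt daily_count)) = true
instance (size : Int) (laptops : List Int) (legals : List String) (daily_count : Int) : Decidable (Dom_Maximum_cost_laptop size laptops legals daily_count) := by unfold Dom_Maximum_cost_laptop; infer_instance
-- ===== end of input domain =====

-- B splits the zipped list into complete batches (shortest prefixes with daily_count
-- legal entries) and maximizes whole-batch sums, instead of A's single accumulate-and-reset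
-- pass; same cost, alternative decomposition.

-- ===== PORT A =====
-- A's loop over zip(laptops, legals) with state (maximum_cost, count, current_cost).
def loopA (d : Int) : List (Int × String) → Int → Int → Int → Int
  | [], m, _, _ => m
  | (c, l) :: rest, m, cnt, cur =>
    -- current_cost += cost
    if l == "illegal" then loopA d rest m cnt (cur + c)
    else if cnt + 1 = d then loopA d rest (max (cur + c) m) 0 0
    else loopA d rest m (cnt + 1) (cur + c)

def Maximum_cost_laptop (size : Int) (laptops : List Int) (legals : List String) (daily_count : Int) : Int :=
  loopA daily_count (laptops.zip legals) 0 0 0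

-- ===== PORT B =====
-- sum(cost for cost, _ in batch)
def sumCosts (pairs : List (Int × String)) : Int := (pairs.map Prod.fst).sum

-- the enumerate loop of _split_batch: i is the enumerate index into `pairs`,
-- `scan` the part still to be scanned (pairs[i:]); slices pairs[:i+1], pairs[i+1:]
-- are take/drop since 0 ≤ i+1 (exact for nonnegative slice bounds).
def splitGo (d : Int) (pairs : List (Int × String)) :
    List (Int × String) → Nat → Int → Option (List (Int × String) × List (Int × String))
  | [], _, _ => none
  | (_, l) :: restScan, i, seen =>
    if l == "illegal" then splitGo d pairs restScan (i + 1) seen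
    else if seen + 1 = d then some (pairs.take (i + 1), pairs.drop (i + 1))
    else splitGo d pairs restScan (i + 1) (seen + 1)

def splitBatch (pairs : List (Int × String)) (d : Int) :
    Option (List (Int × String) × List (Int × String)) :=
  if d ≤ 0 then none else splitGo d pairs pairs 0 0

-- termination of the while-loop: the remainder returned by _split_batch is shorter
theorem splitGo_some_length (d : Int) (pairs : List (Int × String)) :
    ∀ (scan : List (Int × String)) (i : Nat) (seen : Int)
      (b r : List (Int × String)), pairs.drop i = scan →
      splitGo d pairs scan i seen = some (b, r) → r.length < pairs.length := by
  intro scan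
  induction scan with
  | nil => intro i seen b r _ h; simp [splitGo] at h
  | cons p tail ih =>
    intro i seen b r hdrop h
    have hlt : i < pairs.length := by
      by_contra hge
      have : pairs.drop i = [] := List.drop_eq_nil_of_le (by omega)
      rw [hdrop] at this; simp at this
    have hdrop' : pairs.drop (i + 1) = tail := by
      rw [← List.drop_drop, hdrop]; rfl
    unfold splitGo at h
    by_cases hil : p.2 == "illegal"
    · simp only [hil, if_true] at h
      exact ih (i + 1) seen b r hdrop' h
    · simp only [hil, if_false] at h
      by_cases hc : seen + 1 = d
      · simp only [hc, if_true] at h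
        have : r = pairs.drop (i + 1) := by
          injection h with h'; injection h' with h1 h2; exact h2.symm
        rw [this]
        simp [List.length_drop]; omega
      · simp only [hc, if_false] at h
        exact ih (i + 1) (seen + 1) b r hdrop' h

theorem splitBatch_some_length (pairs : List (Int × String)) (d : Int)
    (b r : List (Int × String)) (h : splitBatch pairs d = some (b, r)) :
    r.length < pairs.length := by
  unfold splitBatch at h
  by_cases hd : d ≤ 0
  · simp [hd] at h
  · simp only [hd, if_false] at h
    exact splitGo_some_length d pairs pairs 0 0 b r rfl h

-- the while True loop of B, with accumulator `best`
def loopB (d : Int) (rest : List (Int × String)) (best : Int) : Int :=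
  match h : splitBatch rest d with
  | none => best
  | some (b, r) => loopB d r (max best (sumCosts b))
termination_by rest.length
decreasing_by exact splitBatch_some_length rest d b r h

def Maximum_cost_laptop_alt (size : Int) (laptops : List Int) (legals : List String) (daily_count : Int) : Int :=
  loopB daily_count (laptops.zip legals) 0

-- ===== PRECONDITION & SPEC =====
def Spec_Maximum_cost_laptop (size : Int) (laptops : List Int) (legals : List String) (daily_count : Int) (out : Int) : Prop := out = Maximum_cost_laptop_alt size laptops legals daily_count
instance (size : Int) (laptops : List Int) (legals : List String) (daily_count : Int) (out : Int) : Decidable (Spec_Maximum_cost_laptop size laptops legals daily_count out) := by unfold Spec_Maximum_cost_laptop; infer_instance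

-- ===== CLAIM (what is proved, stated in full; the proofs are below) =====
def Claim_equal_Maximum_cost_laptop : Prop := ∀ (size : Int) (laptops : List Int) (legals : List String) (daily_count : Int), Dom_Maximum_cost_laptop size laptops legals daily_count → Spec_Maximum_cost_laptop size laptops legals daily_count (Maximum_cost_laptop size laptops legals daily_count)

-- ===== LEMMAS AND PROOFS =====

-- Structural version of _split_batch (first batch relative to the scanned list).
def S (d : Int) : List (Int × String) → Int → Option (List (Int × String) × List (Int × String))
  | [], _ => none
  | p :: tail, seen =>
    if p.2 == "illegal" then
      match S d tail seen with
      | none => none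
      | some (b, r) => some (p :: b, r)
    else if seen + 1 = d then some ([p], tail)
    else
      match S d tail (seen + 1) with
      | none => none
      | some (b, r) => some (p :: b, r)

-- maximum over batch sums, generalized by a partially-filled current batch (seen, cur)
def G (d : Int) : List (Int × String) → Int → Int → Int
  | [], _, _ => 0
  | (c, l) :: rest, seen, cur =>
    if l == "illegal" then G d rest seen (cur + c)
    else if seen + 1 = d then max (cur + c) (G d rest 0 0)
    else G d rest (seen + 1) (cur + c)

-- A's loop computes max of its accumulator with G
theorem loopA_eq_G (d : Int) : ∀ (pairs : List (Int × String)) (m cnt cur : Int),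
    0 ≤ m → loopA d pairs m cnt cur = max m (G d pairs cnt cur) := by
  intro pairs
  induction pairs with
  | nil => intro m cnt cur hm; simp [loopA, G]; omega
  | cons p rest ih =>
    intro m cnt cur hm
    obtain ⟨c, l⟩ := p
    unfold loopA G
    split_ifs with h1 h2
    · exact ih m cnt (cur + c) hm
    · rw [ih (max (cur + c) m) 0 0 (le_trans hm (le_max_right _ _))]
      rw [max_comm (cur + c) m, max_assoc]
    · exact ih m (cnt + 1) (cur + c) hm

-- splitGo with the scan-suffix invariant equals the structural splitter (plus the
-- already-scanned prefix on the batch)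
theorem splitGo_eq_S (d : Int) (pairs : List (Int × String)) :
    ∀ (scan : List (Int × String)) (i : Nat) (seen : Int), pairs.drop i = scan →
      splitGo d pairs scan i seen =
        (S d scan seen).map (fun br => (pairs.take i ++ br.1, br.2)) := by
  intro scan
  induction scan with
  | nil => intro i seen _; simp [splitGo, S]
  | cons p tail ih =>
    intro i seen hdrop
    have hlt : i < pairs.length := by
      by_contra hge
      have : pairs.drop i = [] := List.drop_eq_nil_of_le (by omega)
      rw [hdrop] at this; simp at this
    have hget : pairs[i] = p := by
      have h0 : (pairs.drop i)[0]'(by rw [hdrop]; simp) = p := by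
        simp [hdrop]
      rw [List.getElem_drop] at h0
      simpa using h0
    have hdrop' : pairs.drop (i + 1) = tail := by
      rw [← List.drop_drop, hdrop]; rfl
    have htake : pairs.take (i + 1) = pairs.take i ++ [p] := by
      rw [List.take_succ, List.getElem?_eq_getElem hlt, hget]; rfl
    unfold splitGo S
    split_ifs with h1 h2
    · rw [ih (i + 1) seen hdrop', htake]
      cases S d tail seen with
      | none => rfl
      | some br => simp
    · rw [htake, hdrop']
      simp
    · rw [ih (i + 1) (seen + 1) hdrop', htake]
      cases S d tail (seen + 1) with
      | none => rfl
      | some br => simp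

theorem splitBatch_eq_S (pairs : List (Int × String)) (d : Int) (hd : ¬ d ≤ 0) :
    splitBatch pairs d = S d pairs 0 := by
  unfold splitBatch
  rw [if_neg hd, splitGo_eq_S d pairs pairs 0 0 rfl]
  cases S d pairs 0 with
  | none => rfl
  | some br => simp

-- G in terms of the structural splitter
theorem G_eq_S (d : Int) : ∀ (scan : List (Int × String)) (seen cur : Int),
    G d scan seen cur =
      match S d scan seen with
      | none => 0
      | some (b, r) => max (cur + sumCosts b) (G d r 0 0) := by
  intro scan
  induction scan with
  | nil => intro seen cur; simp [G, S]
  | cons p tail ih =>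
    intro seen cur
    obtain ⟨c, l⟩ := p
    simp only [G, S]
    split_ifs with h1 h2
    · rw [ih seen (cur + c)]
      cases hs : S d tail seen with
      | none => rfl
      | some br =>
        obtain ⟨b, r⟩ := br
        simp [sumCosts, add_assoc]
    · simp [sumCosts]
    · rw [ih (seen + 1) (cur + c)]
      cases hs : S d tail (seen + 1) with
      | none => rfl
      | some br =>
        obtain ⟨b, r⟩ := br
        simp [sumCosts, add_assoc]

-- with d ≤ 0 and a nonnegative counter the complete-batch branch never fires
theorem G_zero_of_nonpos (d : Int) (hd : d ≤ 0) :
    ∀ (pairs : List (Int × String)) (seen cur : Int), 0 ≤ seen →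
      G d pairs seen cur = 0 := by
  intro pairs
  induction pairs with
  | nil => intro seen cur _; simp [G]
  | cons p rest ih =>
    intro seen cur hseen
    obtain ⟨c, l⟩ := p
    unfold G
    split_ifs with h1 h2
    · exact ih seen (cur + c) hseen
    · omega
    · exact ih (seen + 1) (cur + c) (by omega)

-- B's loop computes max of its accumulator with G (fresh batch state)
theorem loopB_eq_G (d : Int) : ∀ (n : Nat) (pairs : List (Int × String)) (best : Int),
    pairs.length ≤ n → 0 ≤ best → loopB d pairs best = max best (G d pairs 0 0) := by
  intro n
  induction n with
  | zero =>
    intro pairs best hlen hbest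
    have hnil : pairs = [] := List.eq_nil_of_length_eq_zero (by omega)
    subst hnil
    rw [loopB]
    split
    next heq => simp only [G]; exact (max_eq_left hbest).symm
    next b r heq =>
      exfalso
      unfold splitBatch splitGo at heq
      split_ifs at heq
  | succ k ih =>
    intro pairs best hlen hbest
    rw [loopB]
    by_cases hd : d ≤ 0
    · have hnone : splitBatch pairs d = none := by unfold splitBatch; rw [if_pos hd]
      split
      next heq =>
        rw [G_zero_of_nonpos d hd pairs 0 0 (le_refl 0)]
        exact (max_eq_left hbest).symm
      next b r heq => rw [hnone] at heq; exact absurd heq (by simp)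
    · split
      next heq =>
        rw [splitBatch_eq_S pairs d hd] at heq
        rw [G_eq_S d pairs 0 0, heq]
        exact (max_eq_left hbest).symm
      next b r heq =>
        have hsplit : splitBatch pairs d = some (b, r) := heq
        have hr : r.length < pairs.length := splitBatch_some_length pairs d b r hsplit
        rw [splitBatch_eq_S pairs d hd] at heq
        rw [ih r (max best (sumCosts b)) (by omega) (le_trans hbest (le_max_left _ _))]
        rw [G_eq_S d pairs 0 0, heq]
        simp only [zero_add]
        rw [max_assoc]

-- ===== VERDICT (by name: the statement is the Claim_ definition above) =====
theorem Maximum_cost_laptop_spec : Claim_equal_Maximum_cost_laptop := by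
  intro size laptops legals d _
  unfold Spec_Maximum_cost_laptop Maximum_cost_laptop Maximum_cost_laptop_alt
  rw [loopA_eq_G d (laptops.zip legals) 0 0 0 (le_refl 0)]
  rw [loopB_eq_G d (laptops.zip legals).length (laptops.zip legals) 0 (le_refl _) (le_refl 0)]
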